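-- pv_equiv track=rewrite | github.com/lluc-palou/ap1-jutge | consolidation-II/P21895.py | upside_downside_equal
-- ===== SOURCE A (Python) =====
-- def last_number(n: int) -> int:
--     """Returns the last number of a given number."""
--
--     if n < 10:
--         return n
--
--     else:
--         return n % 10
--
-- def upside_downside_equal(n: int) -> bool:
--     """Determines if the number is the same seen upside and downside."""
--     m = n
--     x = 0
--
--     while n > 9:
--         if last_number(n) == 6:
--             x = x * 10 + 9
--         elif last_number(n) == 9:
--             x = x * 10 + 6
--         else:
--             x = x * 10 + last_number(n)
--         n = n // 10
--
--     if n == 6: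
--         x = x * 10 + 9
--     elif n == 9:
--         x = x * 10 + 6
--     else:
--         x = x * 10 + n
--
--     if x != m:
--         return False
--     else:
--         return True
-- ===== SOURCE B (Python) =====
-- def upside_downside_equal(n: int) -> bool:
--     """Determines if the number is the same seen upside and downside."""
--     if n < 10:
--         return n not in (6, 9)
--     digits = []
--     while n > 0:
--         digits.append(n % 10)
--         n //= 10
--     swap = {6: 9, 9: 6}
--     return digits == [swap.get(d, d) for d in reversed(digits)]
-- ===== Notes on version B (the rewrite author's own statement) =====
-- stated objective: alternative
-- what changed: Instead of reconstructing the rotated integer digit by digit and comparing it numerically with the original, B builds the digit list once and compares it as a list with the six-for-nine-swapped reversal of itself (special-casing n < 10 arithmetically, which covers negatives exactly as A does).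
import Mathlib
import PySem

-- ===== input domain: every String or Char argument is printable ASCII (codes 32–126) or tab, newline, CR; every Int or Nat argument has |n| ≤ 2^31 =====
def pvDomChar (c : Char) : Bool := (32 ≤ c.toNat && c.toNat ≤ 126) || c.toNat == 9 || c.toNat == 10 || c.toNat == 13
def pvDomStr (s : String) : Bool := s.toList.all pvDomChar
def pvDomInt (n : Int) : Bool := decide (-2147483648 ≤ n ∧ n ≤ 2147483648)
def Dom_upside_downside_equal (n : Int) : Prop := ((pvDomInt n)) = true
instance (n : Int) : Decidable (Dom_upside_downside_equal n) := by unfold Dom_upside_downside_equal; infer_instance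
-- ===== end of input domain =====

-- B replaces A's rebuild-the-rotated-integer-and-compare loop by a digit-list comparison with its six-for-nine-swapped reversal (objective: alternative, same cost).

-- ===== PORT A =====
def pvLastNumber (n : Int) : Int := if n < 10 then n else PySem.Int.mod n 10

-- the 'while n > 9' loop of A, returning the final (n, x)
def pvALoop (n x : Int) : Int × Int :=
  if _h : n > 9 then
    pvALoop (PySem.Int.floordiv n 10)
      (if pvLastNumber n == 6 then x * 10 + 9
       else if pvLastNumber n == 9 then x * 10 + 6
       else x * 10 + pvLastNumber n)
  else (n, x)
termination_by n.toNat
decreasing_by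
  simp only [PySem.Int.floordiv]
  rw [Int.fdiv_eq_ediv]
  simp
  omega

def upside_downside_equal (n : Int) : Bool :=
  let m := n
  let p := pvALoop n 0
  let n1 := p.1
  let x0 := p.2
  let x := if n1 == 6 then x0 * 10 + 9
           else if n1 == 9 then x0 * 10 + 6
           else x0 * 10 + n1
  if x != m then false else true

-- ===== PORT B =====
-- B's 'while n > 0' digit-collecting loop (LSB first)
def pvBDigits (n : Int) : List Int :=
  if _h : n > 0 then PySem.Int.mod n 10 :: pvBDigits (PySem.Int.floordiv n 10) else []
termination_by n.toNat
decreasing_by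
  simp only [PySem.Int.floordiv]
  rw [Int.fdiv_eq_ediv]
  simp
  omega

def pvSwap : PySem.Dict Int Int := PySem.Dict.ofList [(6, 9), (9, 6)]

def upside_downside_equal_alt (n : Int) : Bool :=
  if n < 10 then !(n == 6 || n == 9)
  else
    let digits := pvBDigits n
    digits == digits.reverse.map (fun d => PySem.Dict.getD pvSwap d d)

-- ===== PRECONDITION & SPEC =====
def Spec_upside_downside_equal (n : Int) (out : Bool) : Prop := out = upside_downside_equal_alt n
instance (n : Int) (out : Bool) : Decidable (Spec_upside_downside_equal n out) := by unfold Spec_upside_downside_equal; infer_instance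

-- ===== CLAIM (what is proved, stated in full; the proofs are below) =====
def Claim_equal_upside_downside_equal : Prop := ∀ (n : Int), Dom_upside_downside_equal n → Spec_upside_downside_equal n (upside_downside_equal n)

-- ===== LEMMAS AND PROOFS =====

-- proof-side digit swap (what both the branch chain of A and the dict of B compute)
def pvSw (d : Int) : Int := if d = 6 then 9 else if d = 9 then 6 else d

theorem pvSwap_getD (d : Int) : PySem.Dict.getD pvSwap d d = pvSw d := by
  have h : pvSwap = PySem.Dict.mk [(6, 9), (9, 6)] := by decide
  rw [h]
  simp only [PySem.Dict.getD, PySem.Dict.get?_mk_cons]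
  unfold pvSw
  by_cases h6 : d = 6
  · simp [h6]
  · by_cases h9 : d = 9
    · simp [h9]
    · simp [PySem.Dict.get?, Ne.symm h6, Ne.symm h9, h6, h9]

theorem pvSw_bound {d : Int} (h : 0 ≤ d ∧ d < 10) : 0 ≤ pvSw d ∧ pvSw d < 10 := by
  unfold pvSw; split_ifs <;> omega

-- little-endian valuation of a digit list
def pvVal : List Int → Int
  | [] => 0
  | d :: t => d + 10 * pvVal t

theorem pvBDigits_pos (n : Int) (h : 0 < n) :
    pvBDigits n = PySem.Int.mod n 10 :: pvBDigits (PySem.Int.floordiv n 10) := by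
  rw [pvBDigits]; simp [h]

theorem pvBDigits_nonpos (n : Int) (h : ¬ 0 < n) : pvBDigits n = [] := by
  rw [pvBDigits]; simp [h]

theorem pvBDigits_bound (n : Int) : ∀ d ∈ pvBDigits n, 0 ≤ d ∧ d < 10 := by
  induction n using pvBDigits.induct with
  | case1 n h ih =>
      rw [pvBDigits_pos n h]
      intro d hd
      rcases List.mem_cons.mp hd with rfl | hd
      · simp only [PySem.Int.mod]
        rw [Int.fmod_eq_emod]; simp; omega
  
      · exact ih d hd
  | case2 n h => rw [pvBDigits_nonpos n h]; simp

theorem pvVal_digits (n : Int) (h : 0 ≤ n) : pvVal (pvBDigits n) = n := by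
  induction n using pvBDigits.induct with
  | case1 n hpos ih =>
      rw [pvBDigits_pos n hpos]
      simp only [pvVal]
      have hdiv : 0 ≤ PySem.Int.floordiv n 10 := by
        simp only [PySem.Int.floordiv]; rw [Int.fdiv_eq_ediv]; simp; omega
      rw [ih hdiv]
      simp only [PySem.Int.mod, PySem.Int.floordiv]
      rw [Int.fmod_eq_emod, Int.fdiv_eq_ediv]; simp; omega
  | case2 n hpos =>
      rw [pvBDigits_nonpos n hpos]
      simp only [pvVal]; omega

theorem pvVal_append (l : List Int) (a : Int) :
    pvVal (l ++ [a]) = pvVal l + a * 10 ^ l.length := by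
  induction l with
  | nil => simp [pvVal]
  | cons d t ih => simp [pvVal, ih]; ring

theorem pvVal_nonneg (l : List Int) (h : ∀ d ∈ l, 0 ≤ d ∧ d < 10) : 0 ≤ pvVal l := by
  induction l with
  | nil => simp [pvVal]
  | cons d t ih =>
      have hd := h d (by simp)
      have ht : 0 ≤ pvVal t := ih (fun x hx => h x (by simp [hx]))
      simp only [pvVal]; omega

-- injectivity of pvVal on equal-length digit lists
theorem pvVal_inj : ∀ (l1 l2 : List Int), l1.length = l2.length →
    (∀ d ∈ l1, 0 ≤ d ∧ d < 10) → (∀ d ∈ l2, 0 ≤ d ∧ d < 10) →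
    pvVal l1 = pvVal l2 → l1 = l2 := by
  intro l1
  induction l1 with
  | nil =>
      intro l2 hlen _ _ _
      exact (List.length_eq_zero_iff.mp hlen.symm).symm
  | cons d t ih =>
      intro l2 hlen h1 h2 hv
      cases l2 with
      | nil => simp at hlen
      | cons e s =>
          have hd := h1 d (by simp)
          have he := h2 e (by simp)
          have htv : 0 ≤ pvVal t := pvVal_nonneg t (fun x hx => h1 x (by simp [hx]))
          have hsv : 0 ≤ pvVal s := pvVal_nonneg s (fun x hx => h2 x (by simp [hx]))
          simp only [pvVal] at hv
          have hde : d = e ∧ pvVal t = pvVal s := by omega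
          have : t = s := by
            apply ih s (by simpa using hlen)
            · intro x hx; exact h1 x (by simp [hx])
            · intro x hx; exact h2 x (by simp [hx])
            · exact hde.2
          simp [hde.1, this]

-- A's loop-plus-final-step, as one function of (n, x)
def pvAFull (n x : Int) : Int :=
  let p := pvALoop n x
  if p.1 == 6 then p.2 * 10 + 9
  else if p.1 == 9 then p.2 * 10 + 6
  else p.2 * 10 + p.1

theorem pvALoop_stop (n x : Int) (h : ¬ n > 9) : pvALoop n x = (n, x) := by
  rw [pvALoop]; simp [h]

theorem pvALoop_step (n x : Int) (h : n > 9) :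
    pvALoop n x = pvALoop (PySem.Int.floordiv n 10)
      (if pvLastNumber n == 6 then x * 10 + 9
       else if pvLastNumber n == 9 then x * 10 + 6
       else x * 10 + pvLastNumber n) := by
  rw [pvALoop]; simp [h]

-- A's accumulated value, expressed through B's digit list
theorem pvAFull_eq (n : Int) (hpos : 0 < n) : ∀ x,
    pvAFull n x = x * 10 ^ (pvBDigits n).length +
      pvVal (((pvBDigits n).reverse.map pvSw)) := by
  induction n using pvBDigits.induct with
  | case2 n h => omega
  | case1 n h ih =>
      intro x
      by_cases hbig : n > 9
      · -- loop iterates once, then induction on n // 10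
        have hdivpos : 0 < PySem.Int.floordiv n 10 := by
          simp only [PySem.Int.floordiv]; rw [Int.fdiv_eq_ediv]; simp; omega
        have hlast : pvLastNumber n = PySem.Int.mod n 10 := by
          unfold pvLastNumber; simp [show ¬ n < 10 by omega]
        have hstep : pvAFull n x =
            pvAFull (PySem.Int.floordiv n 10) (x * 10 + pvSw (PySem.Int.mod n 10)) := by
          unfold pvAFull
          rw [pvALoop_step n x hbig, hlast]
          unfold pvSw
          by_cases h6 : PySem.Int.mod n 10 = 6 <;>
            by_cases h9 : PySem.Int.mod n 10 = 9 <;> simp_all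
        rw [hstep, ih hdivpos]
        rw [pvBDigits_pos n h]
        simp only [List.reverse_cons, List.map_append, List.map_cons, List.map_nil,
          List.length_cons]
        rw [pvVal_append]
        simp only [List.length_map, List.length_reverse]
        ring
      · -- 0 < n ≤ 9: the loop does not run; the final step handles the single digit
        have hd : pvBDigits n = [PySem.Int.mod n 10] := by
          rw [pvBDigits_pos n h, pvBDigits_nonpos]
          simp only [PySem.Int.floordiv]; rw [Int.fdiv_eq_ediv]; simp; omega
        have hm : PySem.Int.mod n 10 = n := by
          simp only [PySem.Int.mod]; rw [Int.fmod_eq_emod]; simp; omega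
        unfold pvAFull
        rw [pvALoop_stop n x hbig, hd, hm]
        simp only [List.reverse_cons, List.reverse_nil, List.nil_append, List.map_cons,
          List.map_nil, List.length_cons, List.length_nil, pvVal]
        unfold pvSw
        by_cases h6 : n = 6 <;> by_cases h9 : n = 9 <;> simp_all

-- ===== VERDICT (by name: the statement is the Claim_ definition above) =====
theorem upside_downside_equal_spec : Claim_equal_upside_downside_equal := by
  intro n _
  unfold Spec_upside_downside_equal upside_downside_equal upside_downside_equal_alt
  by_cases hsmall : n < 10
  · -- single "digit" (including negatives and 0–9): A applies the final swap directly
    rw [pvALoop_stop n 0 (by omega)]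
    simp only [hsmall, if_pos]
    by_cases h6 : n = 6 <;> by_cases h9 : n = 9 <;> simp_all
  · -- n ≥ 10: both sides reduce to the digit-list palindrome-with-swap condition
    have hpos : 0 < n := by omega
    simp only [hsmall, if_false]
    have hx : (if (pvALoop n 0).1 == 6 then (pvALoop n 0).2 * 10 + 9
               else if (pvALoop n 0).1 == 9 then (pvALoop n 0).2 * 10 + 6
               else (pvALoop n 0).2 * 10 + (pvALoop n 0).1)
              = pvVal ((pvBDigits n).reverse.map pvSw) := by
      have := pvAFull_eq n hpos 0
      unfold pvAFull at this
      simpa using this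
    simp only [hx]
    set ds := pvBDigits n with hds
    have hbnd := pvBDigits_bound n
    rw [← hds] at hbnd
    have hiff : (pvVal (ds.reverse.map pvSw) = n) ↔
        (ds = ds.reverse.map (fun d => PySem.Dict.getD pvSwap d d)) := by
      have hval : pvVal ds = n := by rw [hds]; exact pvVal_digits n (by omega)
      have hgetD : ds.reverse.map (fun d => PySem.Dict.getD pvSwap d d)
          = ds.reverse.map pvSw := by
        apply List.map_congr_left; intro d _; exact pvSwap_getD d
      rw [hgetD]
      constructor
      · intro hv
        have : ds.reverse.map pvSw = ds := by
          apply pvVal_inj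
          · simp
          · intro d hd
            rcases List.mem_map.mp hd with ⟨e, he, rfl⟩
            exact pvSw_bound (hbnd e (List.mem_reverse.mp he))
          · exact hbnd
          · rw [hv, hval]
        exact this.symm
      · intro hl
        rw [← hl, hval]
    by_cases hcond : pvVal (List.map pvSw ds.reverse) = n
    · have hl := hiff.mp hcond
      rw [hcond]
      simp only [bne_self_eq_false, Bool.false_eq_true, if_false]
      exact (beq_of_eq hl).symm
    · have hne : ¬ ds = ds.reverse.map (fun d => PySem.Dict.getD pvSwap d d) :=
        fun hl => hcond (hiff.mpr hl)
      rw [if_pos (by simpa [bne_iff_ne] using hcond)]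
      exact (beq_eq_false_iff_ne.mpr hne).symm
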